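-- pv_equiv track=rewrite | github.com/angus4718/lob-deep-survival-analysis | src/order_tracking.py | _select_split_points
-- ===== SOURCE A (Python) =====
-- def _select_split_points(empty_points: list[int], n: int) -> list[int]:
--     """
--     Choose ``n - 1`` timestamps from *empty_points* that divide the
--     timeline ``[empty_points[0], empty_points[-1]]`` into *n* roughly
--     equal segments.
--
--     Args:
--         empty_points: Sorted list of empty-market timestamps (ns).
--         n: Desired number of chunks.
--
--     Returns:
--         Sorted list of ``n - 1`` split timestamps (may be fewer if there
--         are not enough distinct empty points).
--     """
--     if n <= 1 or not empty_points:
--         return []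
--     lo, hi = empty_points[0], empty_points[-1]
--     if lo == hi:
--         return []
--     targets = [lo + i * (hi - lo) // n for i in range(1, n)]
--     chosen: set = set()
--     for target in targets:
--         best = min(empty_points, key=lambda t: abs(t - target))
--         chosen.add(best)
--     return sorted(chosen)
-- ===== SOURCE B (Python) =====
-- def _bisect_left(a, x):
--     lo, hi = 0, len(a)
--     while lo < hi:
--         mid = (lo + hi) // 2
--         if a[mid] < x:
--             lo = mid + 1
--         else:
--             hi = mid
--     return lo
--
--
-- def _select_split_points(empty_points: list[int], n: int) -> list[int]:
--     # Binary search in the sorted distinct values instead of a full scan per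
--     # target; tie between the two neighbours is broken, like min(), by first
--     # occurrence in the original list.
--     if n <= 1 or not empty_points:
--         return []
--     lo, hi = empty_points[0], empty_points[-1]
--     if lo == hi:
--         return []
--     vals = sorted(set(empty_points))
--     chosen: set = set()
--     for i in range(1, n):
--         target = lo + i * (hi - lo) // n
--         j = _bisect_left(vals, target)
--         if j == len(vals):
--             best = vals[-1]
--         elif j == 0:
--             best = vals[0]
--         else:
--             a, b = vals[j - 1], vals[j]
--             da, db = target - a, b - target
--             if da < db or (da == db and empty_points.index(a) < empty_points.index(b)):
--                 best = a
--             else: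
--                 best = b
--         chosen.add(best)
--     return sorted(chosen)
-- ===== Notes on version B (the rewrite author's own statement) =====
-- stated objective: faster
-- what changed: A scans the whole list with min(key=abs) for each of the n-1 targets; B sorts the distinct values once and binary-searches each target, comparing only the two neighbouring values (ties broken, like min(), by first occurrence in the original list).
import Mathlib
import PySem

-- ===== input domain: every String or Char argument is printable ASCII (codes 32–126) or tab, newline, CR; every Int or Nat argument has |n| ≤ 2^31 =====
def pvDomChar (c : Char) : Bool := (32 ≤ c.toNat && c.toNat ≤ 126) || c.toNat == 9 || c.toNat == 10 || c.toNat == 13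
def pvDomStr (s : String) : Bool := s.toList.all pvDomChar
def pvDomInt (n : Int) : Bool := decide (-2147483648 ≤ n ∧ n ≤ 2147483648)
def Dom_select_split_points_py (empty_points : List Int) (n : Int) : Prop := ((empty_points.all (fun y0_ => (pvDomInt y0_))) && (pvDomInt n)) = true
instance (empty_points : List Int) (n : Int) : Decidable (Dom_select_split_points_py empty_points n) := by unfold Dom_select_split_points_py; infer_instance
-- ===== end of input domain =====

-- B replaces A's full scan of the list per target by a binary search over the
-- sorted distinct values (tie between the two neighbours broken, like min(),
-- by first occurrence in the original list); objective: faster.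

-- ===== PORT A =====
def select_split_points_py (empty_points : List Int) (n : Int) : List Int :=
  if n ≤ 1 ∨ empty_points = [] then []
  else
    let lo := PySem.List.pyGetD empty_points 0 0
    let hi := PySem.List.pyGetD empty_points (-1) 0
    if lo = hi then []
    else
      let targets := (PySem.List.pyRange 1 n 1).map
        (fun i => lo + PySem.Int.floordiv (i * (hi - lo)) n)
      let chosen := targets.foldl
        (fun acc target =>
          -- min() on the (nonempty here) list: min? is some, so getD's default is never used
          PySem.Set.add acc ((PySem.List.min? empty_points (fun t => |t - target|)).getD 0))
        PySem.Set.empty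
      PySem.List.sorted chosen (fun x => x) false

-- ===== PORT B =====
-- Source B's hand-written _bisect_left is exactly Python's bisect_left loop,
-- which PySem.List.bisectLeft transcribes step for step.
def ssp_bestNear (empty_points : List Int) (vals : List Int) (target : Int) : Int :=
  let j := PySem.List.bisectLeft vals target
  if j = vals.length then PySem.List.pyGetD vals (-1) 0
  else if j = 0 then PySem.List.pyGetD vals 0 0
  else
    let a := PySem.List.pyGetD vals ((j : Int) - 1) 0
    let b := PySem.List.pyGetD vals (j : Int) 0
    let da := target - a
    let db := b - target
    -- list.index never raises here: a and b are values drawn from the list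
    if da < db ∨ (da = db ∧
        (PySem.List.index? empty_points a).getD 0 < (PySem.List.index? empty_points b).getD 0)
    then a else b

def select_split_points_py_alt (empty_points : List Int) (n : Int) : List Int :=
  if n ≤ 1 ∨ empty_points = [] then []
  else
    let lo := PySem.List.pyGetD empty_points 0 0
    let hi := PySem.List.pyGetD empty_points (-1) 0
    if lo = hi then []
    else
      let vals := PySem.List.sorted (PySem.Set.ofList empty_points) (fun x => x) false
      let chosen := (PySem.List.pyRange 1 n 1).foldl
        (fun acc i =>
          PySem.Set.add acc
            (ssp_bestNear empty_points vals (lo + PySem.Int.floordiv (i * (hi - lo)) n)))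
        PySem.Set.empty
      PySem.List.sorted chosen (fun x => x) false

-- ===== PRECONDITION & SPEC =====
def Spec_select_split_points_py (empty_points : List Int) (n : Int) (out : List Int) : Prop := out = select_split_points_py_alt empty_points n
instance (empty_points : List Int) (n : Int) (out : List Int) : Decidable (Spec_select_split_points_py empty_points n out) := by unfold Spec_select_split_points_py; infer_instance

-- ===== CLAIM (what is proved, stated in full; the proofs are below) =====
def Claim_equal_select_split_points_py : Prop := ∀ (empty_points : List Int) (n : Int), Dom_select_split_points_py empty_points n → Spec_select_split_points_py empty_points n (select_split_points_py empty_points n)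

-- ===== LEMMAS AND PROOFS =====

-- the step of Python's min(xs, key=key)
def sspStep (key : Int → Int) : Option Int → Int → Option Int :=
  fun acc x => match acc with
    | none => some x
    | some m' => if key x < key m' then some x else some m'

-- min?'s fold keeps the FIRST element of minimal key: invariant of the fold
lemma ssp_min_fold_char (key : Int → Int) :
    ∀ (xs : List Int) (c m : Int),
      List.foldl (sspStep key) (some c) xs = some m →
      (m = c ∧ ∀ y ∈ xs, key c ≤ key y) ∨
      (∃ pre suf, xs = pre ++ m :: suf ∧ key m < key c ∧
        (∀ y ∈ pre, key m < key y) ∧ (∀ y ∈ suf, key m ≤ key y)) := by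
  intro xs
  induction xs with
  | nil => intro c m h; left; simp at h; simp [h]
  | cons x t ih =>
    intro c m h
    simp only [List.foldl_cons, sspStep] at h
    by_cases hx : key x < key c
    · rw [if_pos hx] at h
      rcases ih x m h with ⟨rfl, hall⟩ | ⟨pre, suf, ht, hlt, hpre, hsuf⟩
      · right; exact ⟨[], t, rfl, hx, by simp, hall⟩
      · right
        refine ⟨x :: pre, suf, by simp [ht], lt_trans hlt hx, ?_, hsuf⟩
        intro y hy
        rcases List.mem_cons.1 hy with h' | hy'
        · subst h'; exact hlt
        · exact hpre y hy'
    · rw [if_neg hx] at h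
      rcases ih c m h with ⟨rfl, hall⟩ | ⟨pre, suf, ht, hlt, hpre, hsuf⟩
      · left
        refine ⟨rfl, ?_⟩
        intro y hy
        rcases List.mem_cons.1 hy with h' | hy'
        · subst h'; exact le_of_not_gt hx
        · exact hall y hy'
      · right
        refine ⟨x :: pre, suf, by simp [ht], hlt, ?_, hsuf⟩
        intro y hy
        rcases List.mem_cons.1 hy with h' | hy'
        · subst h'; exact lt_of_lt_of_le hlt (le_of_not_gt hx)
        · exact hpre y hy'

lemma ssp_min?_cons (key : Int → Int) (x : Int) (t : List Int) :
    PySem.List.min? (x :: t) key = List.foldl (sspStep key) (some x) t := by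
  simp only [PySem.List.min?, List.foldl_cons]
  congr 1
  funext acc y; cases acc <;> rfl

-- the first-minimal characterisation of min?
lemma ssp_min_char (key : Int → Int) (xs : List Int) (m : Int)
    (h : PySem.List.min? xs key = some m) :
    ∃ pre suf, xs = pre ++ m :: suf ∧
      (∀ y ∈ pre, key m < key y) ∧ (∀ y ∈ suf, key m ≤ key y) := by
  cases xs with
  | nil => simp [PySem.List.min?] at h
  | cons x t =>
    have h' : List.foldl (sspStep key) (some x) t = some m := by
      rw [← ssp_min?_cons]; exact h
    rcases ssp_min_fold_char key t x m h' with ⟨rfl, hall⟩ | ⟨pre, suf, ht, hlt, hpre, hsuf⟩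
    · exact ⟨[], t, rfl, by simp, hall⟩
    · refine ⟨x :: pre, suf, by simp [ht], ?_, hsuf⟩
      intro y hy
      rcases List.mem_cons.1 hy with h'' | hy'
      · subst h''; exact hlt
      · exact hpre y hy'

lemma ssp_index?_append_not_mem (v : Int) (l t : List Int) (h : v ∉ l) :
    PySem.List.index? (l ++ t) v = (PySem.List.index? t v).map (· + l.length) := by
  induction l with
  | nil =>
    rw [List.nil_append]
    cases h : PySem.List.index? t v <;> simp
  | cons x l ih =>
    have hx : x ≠ v := by intro hxv; exact h (by simp [hxv])
    have hv : v ∉ l := fun hv => h (List.mem_cons_of_mem _ hv)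
    rw [List.cons_append, PySem.List.index?_cons_of_ne _ hx, ih hv]
    cases PySem.List.index? t v
    · simp
    · simp; omega

-- m sits strictly before v in xs (first occurrences)
lemma ssp_first_lt (xs pre suf : List Int) (m v : Int)
    (hx : xs = pre ++ m :: suf) (hm : m ∉ pre) (hv : v ∉ pre) (hvm : v ≠ m)
    (hvmem : v ∈ xs) :
    (PySem.List.index? xs m).getD 0 < (PySem.List.index? xs v).getD 0 := by
  subst hx
  rw [ssp_index?_append_not_mem m pre _ hm, ssp_index?_append_not_mem v pre _ hv]
  rw [PySem.List.index?_cons_self, PySem.List.index?_cons_of_ne _ (Ne.symm hvm)]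
  have hvsuf : v ∈ suf := by
    rcases List.mem_append.1 hvmem with h | h
    · exact absurd h hv
    · rcases List.mem_cons.1 h with h' | h'
      · exact absurd h' hvm
      · exact h'
  rcases Option.isSome_iff_exists.1 ((PySem.List.index?_isSome_iff suf v).2 hvsuf) with ⟨k, hk⟩
  rw [hk]
  simp

-- pyGetD with index -1 on a nonempty list is the last element
lemma ssp_pyGetD_neg_one (v : List Int) (d : Int) (h : v ≠ []) :
    PySem.List.pyGetD v (-1) d = v[v.length - 1]'(by
      have := List.length_pos_iff.2 h; omega) := by
  have hl : 0 < v.length := List.length_pos_iff.2 h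
  simp only [PySem.List.pyGetD, PySem.List.pyGet?, PySem.List.pyIdx?]
  rw [if_neg (by omega), if_pos (by omega)]
  simp only [Option.bind_some]
  rw [List.getElem?_eq_getElem (by omega)]
  simp

-- the heart: binary-search neighbour selection = Python's min(…, key=abs(t-target))
lemma ssp_best_eq (xs : List Int) (hne : xs ≠ []) (target : Int) :
    ssp_bestNear xs (PySem.List.sorted (PySem.Set.ofList xs) (fun x => x) false) target
      = (PySem.List.min? xs (fun t => |t - target|)).getD 0 := by
  set vals := PySem.List.sorted (PySem.Set.ofList xs) (fun x => x) false with hvals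
  obtain ⟨m, hm⟩ : ∃ m, PySem.List.min? xs (fun t => |t - target|) = some m := by
    cases h : PySem.List.min? xs (fun t => |t - target|) with
    | none => exact absurd ((PySem.List.min?_eq_none_iff xs _).1 h) hne
    | some m => exact ⟨m, rfl⟩
  have hmin : ∀ y ∈ xs, |m - target| ≤ |y - target| := PySem.List.min?_isMin hm
  have hmmem : m ∈ xs := PySem.List.min?_mem hm
  obtain ⟨pre, suf, hxdec, hpre, hsuf⟩ := ssp_min_char _ xs m hm
  have hvpair : vals.Pairwise (· < ·) := PySem.List.sorted_ofList_pairwise_lt xs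
  have hvmem : ∀ v, v ∈ vals ↔ v ∈ xs := by
    intro v; rw [hvals, PySem.List.mem_sorted, PySem.Set.mem_ofList]
  have hvne : vals ≠ [] := by
    intro h0
    rcases List.exists_mem_of_ne_nil xs hne with ⟨x, hx⟩
    have := (hvmem x).2 hx; rw [h0] at this; simp at this
  have hL : 0 < vals.length := List.length_pos_iff.2 hvne
  have hmono : ∀ (p q : ℕ) (hp : p < vals.length) (hq : q < vals.length),
      p < q → vals[p] < vals[q] :=
    fun p q hp hq hpq => (List.pairwise_iff_getElem.1 hvpair) p q hp hq hpq
  obtain ⟨hjle, hlt, hge⟩ := PySem.List.bisectLeft_spec vals target (hvpair.imp le_of_lt)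
  set j := PySem.List.bisectLeft vals target with hj
  obtain ⟨k, hk, hkm⟩ := List.mem_iff_getElem.1 ((hvmem m).2 hmmem)
  rw [hm]
  simp only [ssp_bestNear, ← hj, Option.getD_some]
  by_cases hjL : j = vals.length
  · -- all values below the target: nearest is the last
    rw [if_pos hjL, ssp_pyGetD_neg_one vals 0 hvne]
    have hlast_mem : vals[vals.length - 1]'(by omega) ∈ xs :=
      (hvmem _).1 (List.getElem_mem _)
    have hmlt : m < target := by
      have := hlt k hk (by omega); omega
    have hllt : vals[vals.length - 1]'(by omega) < target := by
      have := hlt (vals.length - 1) (by omega) (by omega); omega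
    have h1 : |m - target| ≤ |vals[vals.length - 1]'(by omega) - target| := hmin _ hlast_mem
    have e1 : |m - target| = target - m := by rw [abs_of_nonpos (by omega)]; ring
    have e2 : |vals[vals.length - 1]'(by omega) - target|
        = target - vals[vals.length - 1]'(by omega) := by
      rw [abs_of_nonpos (by omega)]; ring
    have h3 : m ≤ vals[vals.length - 1]'(by omega) := by
      rcases Nat.lt_or_ge k (vals.length - 1) with h | h
      · have := hmono k (vals.length - 1) hk (by omega) h; omega
      · have hk1 : k = vals.length - 1 := by omega
        subst hk1; exact le_of_eq hkm.symm
    omega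
  · rw [if_neg hjL]
    by_cases hj0 : j = 0
    · -- all values at or above the target: nearest is the first
      rw [if_pos hj0]
      have h0 : PySem.List.pyGetD vals 0 0 = vals[0] := by
        have := PySem.List.pyGetD_natCast vals 0 0
        simpa [List.getD_eq_getElem?_getD, List.getElem?_eq_getElem hL] using this
      rw [h0]
      have h0mem : vals[0] ∈ xs := (hvmem _).1 (List.getElem_mem _)
      have hmge : target ≤ m := by
        have := hge k hk (by omega); omega
      have h0ge : target ≤ vals[0] := by
        have := hge 0 hL (by omega); omega
      have h1 : |m - target| ≤ |vals[0] - target| := hmin _ h0mem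
      have e1 : |m - target| = m - target := by rw [abs_of_nonneg (by omega)]
      have e2 : |vals[0] - target| = vals[0] - target := by rw [abs_of_nonneg (by omega)]
      have h3 : vals[0] ≤ m := by
        rcases Nat.eq_or_lt_of_le (Nat.zero_le k) with h | h
        · have hk0 : k = 0 := h.symm
          subst hk0; exact le_of_eq hkm
        · have := hmono 0 k hL hk h; omega
      omega
    · -- the two neighbours of the target
      rw [if_neg hj0]
      have hj1 : 1 ≤ j := by omega
      have hjlt : j < vals.length := by omega
      have hja : PySem.List.pyGetD vals ((j : Int) - 1) 0 = vals[j-1]'(by omega) := by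
        have hcast : ((j : Int) - 1) = ((j - 1 : ℕ) : Int) := by push_cast [hj1]; ring
        rw [hcast, PySem.List.pyGetD_natCast]
        rw [List.getD_eq_getElem?_getD, List.getElem?_eq_getElem (by omega)]
        simp
      have hjb : PySem.List.pyGetD vals ((j : Int)) 0 = vals[j] := by
        rw [show ((j : Int)) = ((j : ℕ) : Int) from rfl, PySem.List.pyGetD_natCast]
        rw [List.getD_eq_getElem?_getD, List.getElem?_eq_getElem hjlt]
        simp
      obtain ⟨a, hadef⟩ : ∃ y : Int, vals[j-1]'(by omega) = y := ⟨_, rfl⟩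
      obtain ⟨b, hbdef⟩ : ∃ y : Int, vals[j] = y := ⟨_, rfl⟩
      rw [hja, hjb, hadef, hbdef]
      have haxs : a ∈ xs := hadef ▸ (hvmem _).1 (List.getElem_mem _)
      have hbxs : b ∈ xs := hbdef ▸ (hvmem _).1 (List.getElem_mem _)
      have halt : a < target := hadef ▸ hlt (j-1) (by omega) (by omega)
      have hbge : target ≤ b := hbdef ▸ hge j hjlt (by omega)
      have hab : a < b := hadef ▸ hbdef ▸ hmono (j-1) j (by omega) hjlt (by omega)
      have hka : |a - target| = target - a := by rw [abs_of_nonpos (by omega)]; ring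
      have hkb : |b - target| = b - target := by rw [abs_of_nonneg (by omega)]
      have hmina : |m - target| ≤ |a - target| := hmin _ haxs
      have hminb : |m - target| ≤ |b - target| := hmin _ hbxs
      have hmab : m = a ∨ m = b := by
        rcases Int.lt_or_le m target with hmt | hmt
        · left
          have hkj : k < j := by
            by_contra h
            have := hge k hk (by omega); omega
          have h1 : m ≤ a := by
            rcases Nat.lt_or_ge k (j-1) with h | h
            · have := hadef ▸ hmono k (j-1) hk (by omega) h; omega
            · have hk1 : k = j - 1 := by omega
              subst hk1
              have ham : a = m := by rw [← hadef]; exact hkm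
              omega
          have e1 : |m - target| = target - m := by rw [abs_of_nonpos (by omega)]; ring
          omega
        · right
          have hkj : j ≤ k := by
            by_contra h
            have := hlt k hk (by omega); omega
          have h1 : b ≤ m := by
            rcases Nat.lt_or_ge j k with h | h
            · have := hbdef ▸ hmono j k hjlt hk h; omega
            · have hk1 : k = j := by omega
              subst hk1
              have hbm : b = m := by rw [← hbdef]; exact hkm
              omega
          have e1 : |m - target| = m - target := by rw [abs_of_nonneg (by omega)]
          omega
      have hmnotpre : m ∉ pre := fun h => absurd (hpre m h) (lt_irrefl _)
      rcases Int.lt_trichotomy (target - a) (b - target) with hd | hd | hd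
      · rw [if_pos (Or.inl hd)]
        rcases hmab with h | h
        · exact h.symm
        · exfalso; rw [h] at hmina; omega
      · -- tie: first occurrence in xs decides
        by_cases hi : (PySem.List.index? xs a).getD 0 < (PySem.List.index? xs b).getD 0
        · rw [if_pos (Or.inr ⟨by omega, hi⟩)]
          rcases hmab with h | h
          · exact h.symm
          · -- m = b: then b occurs (first) before a, contradicting hi
            exfalso
            have hanotpre : a ∉ pre := by
              intro hp; have hq := hpre a hp; rw [h] at hq; omega
            have hfl := ssp_first_lt xs pre suf m a hxdec hmnotpre hanotpre (by omega) haxs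
            rw [← h] at hi
            omega
        · rw [if_neg (by
            rintro (h | ⟨-, h⟩)
            · omega
            · exact hi h)]
          rcases hmab with h | h
          · -- m = a: then a occurs (first) before b, contradicting ¬hi
            exfalso
            have hbnotpre : b ∉ pre := by
              intro hp; have hq := hpre b hp; rw [h] at hq; omega
            have hfl := ssp_first_lt xs pre suf m b hxdec hmnotpre hbnotpre (by omega) hbxs
            rw [← h] at hi
            omega
          · exact h.symm
      · rw [if_neg (by rintro (h | ⟨h, -⟩) <;> omega)]
        rcases hmab with h | h
        · exfalso; rw [h] at hminb; omega
        · exact h.symm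

-- ===== VERDICT (by name: the statement is the Claim_ definition above) =====
theorem select_split_points_py_spec : Claim_equal_select_split_points_py := by
  intro xs n _
  unfold Spec_select_split_points_py select_split_points_py select_split_points_py_alt
  by_cases hg : n ≤ 1 ∨ xs = []
  · rw [if_pos hg, if_pos hg]
  · rw [if_neg hg, if_neg hg]
    have hne : xs ≠ [] := fun h => hg (Or.inr h)
    simp only
    by_cases hlh : PySem.List.pyGetD xs 0 0 = PySem.List.pyGetD xs (-1) 0
    · rw [if_pos hlh, if_pos hlh]
    · rw [if_neg hlh, if_neg hlh]
      congr 1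
      rw [List.foldl_map]
      exact PySem.List.foldl_congr_mem _ _ _ _
        (fun acc i _ => by rw [ssp_best_eq xs hne])
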